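-- pv_equiv track=rewrite | github.com/unisom0rphic/enigma | backend/app/services/email_service.py | _map_entities_to_schema
-- ===== SOURCE A (Python) =====
-- from typing import Dict, List, Optional
--
-- def _map_entities_to_schema(entities: List[Dict], sender_email: str) -> Dict:
--     data = {
--         "full_name": None,
--         "phone_num": None,
--         "email": sender_email,  # Берем только из заголовков письма
--         "object_name": None,
--         "device_type": None,
--         "device_num": None,
--     }
--
--     for ent in entities:
--         etype = ent["type"]
--         if etype == "NAME" and not data["full_name"]:
--             data["full_name"] = ent["normal"]
--         elif etype == "PHONE" and not data["phone_num"]: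
--             data["phone_num"] = ent["normal"]
--         # Убрал блок elif etype == "EMAIL" ...
--         # так как email уже определен из sender_email
--         elif etype == "DEVICE":
--             if ent["text"] != ent["normal"]:
--                 data["device_num"] = ent["text"]
--                 data["device_type"] = ent["normal"]
--             else:
--                 data["device_type"] = ent["normal"]
--     return data
-- ===== SOURCE B (Python) =====
-- from typing import Dict, List, Optional
--
-- def _map_entities_to_schema(entities: List[Dict], sender_email: str) -> Dict:
--     devices = [e for e in entities if e["type"] == "DEVICE"]
--     return {
--         "full_name": next((e["normal"] for e in entities if e["type"] == "NAME" and e["normal"]), None),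
--         "phone_num": next((e["normal"] for e in entities if e["type"] == "PHONE" and e["normal"]), None),
--         "email": sender_email,
--         "object_name": None,
--         "device_type": devices[-1]["normal"] if devices else None,
--         "device_num": next((d["text"] for d in reversed(devices) if d["text"] != d["normal"]), None),
--     }
-- ===== Notes on version B (the rewrite author's own statement) =====
-- stated objective: simpler
-- what changed: Replaces the single stateful accumulating loop with one independent targeted expression per output field (generator scans and a device filter); Pre_ excludes inputs where an entity lacks a key the mapping may read (A raises KeyError on most of them; on a few, e.g. a keyless NAME entity after a truthy one, both programs' short-circuiting skips the lookup and they return the same value — key-presence is the natural closed-form domain).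
-- intended difference: When the input contains NAME (resp. PHONE) entities but all their 'normal' values are the empty string, A's truthiness guard keeps overwriting full_name (phone_num) with falsy values and returns '', while B returns None; None is the schema's intended 'not found' value, an empty string is an accident of A's loop. — e.g. on _map_entities_to_schema([[("type", "NAME"), ("normal", "")]], "x"): A returns [("full_name", some ""), ("phone_num", none), ("email", some "x"), ("object_name", none), ("device_type", none), ("devi…, B returns [("full_name", none), ("phone_num", none), ("email", some "x"), ("object_name", none), ("device_type", none), ("device_…
import Mathlib
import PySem

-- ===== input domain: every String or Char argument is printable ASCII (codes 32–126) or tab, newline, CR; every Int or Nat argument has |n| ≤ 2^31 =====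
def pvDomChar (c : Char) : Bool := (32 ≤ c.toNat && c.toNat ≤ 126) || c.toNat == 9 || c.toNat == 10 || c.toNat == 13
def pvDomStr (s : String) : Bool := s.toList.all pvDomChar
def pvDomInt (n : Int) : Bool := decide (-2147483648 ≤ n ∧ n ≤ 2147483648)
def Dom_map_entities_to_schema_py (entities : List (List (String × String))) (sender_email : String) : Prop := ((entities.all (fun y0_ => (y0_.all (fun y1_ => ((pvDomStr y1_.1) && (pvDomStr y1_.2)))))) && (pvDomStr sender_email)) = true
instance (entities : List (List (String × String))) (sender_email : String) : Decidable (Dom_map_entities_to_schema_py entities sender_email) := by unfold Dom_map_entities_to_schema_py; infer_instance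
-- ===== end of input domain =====

-- B computes each output field with its own targeted scan instead of A's single stateful loop
-- (simpler decomposition, same O(n)); where all NAME/PHONE normals are empty, B returns None
-- where A returns "" (intended difference D_ below).

-- dict lookup, first match; the "" default is only reachable outside Pre_ (Python raises KeyError there)
def pvGetD (e : List (String × String)) (k : String) : String :=
  ((e.find? (fun p => p.1 == k)).map (fun p => p.2)).getD ""

def pvHasKey (e : List (String × String)) (k : String) : Bool :=
  (e.find? (fun p => p.1 == k)).isSome

-- ===== PORT A =====
-- the loop's mutable state: (full_name, phone_num, device_type, device_num); email/object_name never change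
def aStep (st : Option String × Option String × Option String × Option String)
    (ent : List (String × String)) : Option String × Option String × Option String × Option String :=
  let etype := pvGetD ent "type"
  if etype == "NAME" && (st.1.getD "" == "") then
    (some (pvGetD ent "normal"), st.2.1, st.2.2.1, st.2.2.2)
  else if etype == "PHONE" && (st.2.1.getD "" == "") then
    (st.1, some (pvGetD ent "normal"), st.2.2.1, st.2.2.2)
  else if etype == "DEVICE" then
    if pvGetD ent "text" != pvGetD ent "normal" then
      (st.1, st.2.1, some (pvGetD ent "normal"), some (pvGetD ent "text"))
    else
      (st.1, st.2.1, some (pvGetD ent "normal"), st.2.2.2)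
  else st

def map_entities_to_schema_py (entities : List (List (String × String))) (sender_email : String) : List (String × Option String) :=
  let st := entities.foldl aStep (none, none, none, none)
  [("full_name", st.1), ("phone_num", st.2.1), ("email", some sender_email),
   ("object_name", none), ("device_type", st.2.2.1), ("device_num", st.2.2.2)]

-- ===== PORT B =====
def map_entities_to_schema_py_alt (entities : List (List (String × String))) (sender_email : String) : List (String × Option String) :=
  let devices := entities.filter (fun e => pvGetD e "type" == "DEVICE")
  let full_name := (entities.find? (fun e => pvGetD e "type" == "NAME" && pvGetD e "normal" != "")).map
    (fun e => pvGetD e "normal")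
  let phone_num := (entities.find? (fun e => pvGetD e "type" == "PHONE" && pvGetD e "normal" != "")).map
    (fun e => pvGetD e "normal")
  let device_type := (devices.getLast?).map (fun d => pvGetD d "normal")
  let device_num := (devices.reverse.find? (fun d => pvGetD d "text" != pvGetD d "normal")).map
    (fun d => pvGetD d "text")
  [("full_name", full_name), ("phone_num", phone_num), ("email", some sender_email),
   ("object_name", none), ("device_type", device_type), ("device_num", device_num)]

-- ===== PRECONDITION & SPEC =====
-- Pre_ excludes inputs where an entity lacks a key the mapping may read: an entity without "type",
-- a NAME/PHONE entity without "normal", a DEVICE entity without "text" or "normal". A raises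
-- KeyError on most of these; on a few (a keyless NAME/PHONE entity after a truthy one) both
-- programs' short-circuiting skips the lookup and they return the same value — see the cites.
def Pre_map_entities_to_schema_py (entities : List (List (String × String))) (sender_email : String) : Prop :=
  (entities.all (fun e =>
    pvHasKey e "type" &&
    (!(pvGetD e "type" == "NAME" || pvGetD e "type" == "PHONE") || pvHasKey e "normal") &&
    (!(pvGetD e "type" == "DEVICE") || (pvHasKey e "normal" && pvHasKey e "text")))) = true
instance (entities : List (List (String × String))) (sender_email : String) : Decidable (Pre_map_entities_to_schema_py entities sender_email) := by unfold Pre_map_entities_to_schema_py; infer_instance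

def pvWitness_map_entities_to_schema_py : (List (List (String × String))) × String :=
  ([[("type", "NAME"), ("normal", "Bob")], [("type", "DEVICE"), ("normal", "iphone"), ("text", "iphone 12")]], "a@b.c")

-- a plain association-list lookup of D_'s own (first matching key), independent of the ports
def dLookup : List (String × String) → String → Option String
  | [], _ => none
  | (k', v) :: rest, k => if k' = k then some v else dLookup rest k

-- When the input contains NAME (resp. PHONE) entities but all their "normal" values are the empty
-- string, A returns full_name = "" (resp. phone_num = ""), an accident of its truthiness-guarded
-- overwriting loop, while B returns None, the schema's intended 'not found' value.
def D_map_entities_to_schema_py (entities : List (List (String × String))) (sender_email : String) : Prop :=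
  ((∃ e ∈ entities, dLookup e "type" = some "NAME") ∧
   (∀ e ∈ entities, dLookup e "type" = some "NAME" → dLookup e "normal" = some "")) ∨
  ((∃ e ∈ entities, dLookup e "type" = some "PHONE") ∧
   (∀ e ∈ entities, dLookup e "type" = some "PHONE" → dLookup e "normal" = some ""))
instance (entities : List (List (String × String))) (sender_email : String) : Decidable (D_map_entities_to_schema_py entities sender_email) := by unfold D_map_entities_to_schema_py; infer_instance

def Spec_map_entities_to_schema_py (entities : List (List (String × String))) (sender_email : String) (out : List (String × Option String)) : Prop := ¬ D_map_entities_to_schema_py entities sender_email → out = map_entities_to_schema_py_alt entities sender_email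
instance (entities : List (List (String × String))) (sender_email : String) (out : List (String × Option String)) : Decidable (Spec_map_entities_to_schema_py entities sender_email out) := by unfold Spec_map_entities_to_schema_py; infer_instance

def pvDiffWitness_map_entities_to_schema_py : (List (List (String × String))) × String :=
  ([[("type", "NAME"), ("normal", "")]], "x")
def pvDiffWitnessOut_map_entities_to_schema_py : (List (String × Option String)) × (List (String × Option String)) :=
  ([("full_name", some ""), ("phone_num", none), ("email", some "x"),
    ("object_name", none), ("device_type", none), ("device_num", none)],
   [("full_name", none), ("phone_num", none), ("email", some "x"),
    ("object_name", none), ("device_type", none), ("device_num", none)])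

-- ===== CLAIM (what is proved, stated in full; the proofs are below) =====
def Claim_unchanged_map_entities_to_schema_py : Prop := ∀ (entities : List (List (String × String))) (sender_email : String), Dom_map_entities_to_schema_py entities sender_email → Pre_map_entities_to_schema_py entities sender_email → Spec_map_entities_to_schema_py entities sender_email (map_entities_to_schema_py entities sender_email)
def Claim_changed_map_entities_to_schema_py : Prop := Dom_map_entities_to_schema_py (pvDiffWitness_map_entities_to_schema_py.1) (pvDiffWitness_map_entities_to_schema_py.2) ∧ Pre_map_entities_to_schema_py (pvDiffWitness_map_entities_to_schema_py.1) (pvDiffWitness_map_entities_to_schema_py.2) ∧ D_map_entities_to_schema_py (pvDiffWitness_map_entities_to_schema_py.1) (pvDiffWitness_map_entities_to_schema_py.2) ∧ map_entities_to_schema_py (pvDiffWitness_map_entities_to_schema_py.1) (pvDiffWitness_map_entities_to_schema_py.2) = pvDiffWitnessOut_map_entities_to_schema_py.1 ∧ map_entities_to_schema_py_alt (pvDiffWitness_map_entities_to_schema_py.1) (pvDiffWitness_map_entities_to_schema_py.2) = pvDiffWitnessOut_map_entities_to_schema_py.2 ∧ pvDiffWitnessOut_map_entities_to_schema_py.1 ≠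 pvDiffWitnessOut_map_entities_to_schema_py.2
def Claim_exact_map_entities_to_schema_py : Prop := ∀ (entities : List (List (String × String))) (sender_email : String), Dom_map_entities_to_schema_py entities sender_email → Pre_map_entities_to_schema_py entities sender_email → D_map_entities_to_schema_py entities sender_email → map_entities_to_schema_py entities sender_email ≠ map_entities_to_schema_py_alt entities sender_email

-- ===== LEMMAS AND PROOFS =====

-- bridge between D_'s own lookup and the ports' pvGetD/pvHasKey
lemma pvGetD_eq_dLookup (e : List (String × String)) (k : String) :
    pvGetD e k = (dLookup e k).getD "" := by
  induction e with
  | nil => rfl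
  | cons p rest ih =>
    obtain ⟨k', v⟩ := p
    by_cases h : k' = k <;> simp [pvGetD, dLookup, List.find?_cons, h] <;> simpa [pvGetD] using ih

lemma pvHasKey_eq_dLookup (e : List (String × String)) (k : String) :
    pvHasKey e k = (dLookup e k).isSome := by
  induction e with
  | nil => rfl
  | cons p rest ih =>
    obtain ⟨k', v⟩ := p
    by_cases h : k' = k <;> simp [pvHasKey, dLookup, List.find?_cons, h] <;> simpa [pvHasKey] using ih

-- within Pre_, the D_ disjunct for ty is equivalent to the Bool form the loop lemmas use
lemma pre_normal (entities : List (List (String × String))) (sender_email : String)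
    (hpre : Pre_map_entities_to_schema_py entities sender_email) (ty : String)
    (hty : ty = "NAME" ∨ ty = "PHONE") :
    ∀ e ∈ entities, (pvGetD e "type" == ty) = true → pvHasKey e "normal" = true := by
  intro e he h
  unfold Pre_map_entities_to_schema_py at hpre
  rw [List.all_eq_true] at hpre
  have hp := hpre e he
  simp only [Bool.and_eq_true, Bool.or_eq_true, Bool.not_eq_eq_eq_not, Bool.not_true] at hp
  rcases hty with rfl | rfl <;> [skip; skip] <;>
    rcases hp.1.2 with hx | hx <;> simp_all

lemma new_of_old (ty : String) (hne : ty ≠ "") (l : List (List (String × String)))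
    (hnorm : ∀ e ∈ l, (pvGetD e "type" == ty) = true → pvHasKey e "normal" = true)
    (hany : (l.any (fun e => pvGetD e "type" == ty)) = true)
    (hall : (l.all (fun e => pvGetD e "type" != ty || pvGetD e "normal" == "")) = true) :
    (∃ e ∈ l, dLookup e "type" = some ty) ∧
    (∀ e ∈ l, dLookup e "type" = some ty → dLookup e "normal" = some "") := by
  rw [List.any_eq_true] at hany
  rw [List.all_eq_true] at hall
  constructor
  · obtain ⟨e, he, h⟩ := hany
    refine ⟨e, he, ?_⟩
    rw [pvGetD_eq_dLookup] at h
    cases hd : dLookup e "type" with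
    | none => rw [hd] at h; simp at h; exact absurd h hne
    | some v => rw [hd] at h; simp at h; simp [h]
  · intro e he hd
    have hty : (pvGetD e "type" == ty) = true := by
      rw [pvGetD_eq_dLookup, hd]; simp
    have hk := hnorm e he hty
    rw [pvHasKey_eq_dLookup] at hk
    have h2 := hall e he
    simp only [Bool.or_eq_true, bne_iff_ne] at h2
    rcases h2 with h2 | h2
    · exact absurd (by simpa using hty) h2
    · rw [pvGetD_eq_dLookup] at h2
      cases hn : dLookup e "normal" with
      | none => rw [hn] at hk; simp at hk
      | some v => rw [hn] at h2; simp at h2; simp [hn, h2]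

lemma old_of_new (ty : String) (hne : ty ≠ "") (l : List (List (String × String)))
    (h1 : ∃ e ∈ l, dLookup e "type" = some ty)
    (h2 : ∀ e ∈ l, dLookup e "type" = some ty → dLookup e "normal" = some "") :
    (l.any (fun e => pvGetD e "type" == ty)) = true ∧
    (l.all (fun e => pvGetD e "type" != ty || pvGetD e "normal" == "")) = true := by
  constructor
  · rw [List.any_eq_true]
    obtain ⟨e, he, hd⟩ := h1
    exact ⟨e, he, by rw [pvGetD_eq_dLookup, hd]; simp⟩
  · rw [List.all_eq_true]
    intro e he
    cases hd : dLookup e "type" with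
    | none =>
      have : (pvGetD e "type" != ty) = true := by
        rw [pvGetD_eq_dLookup, hd]; simpa using (Ne.symm hne)
      simp [this]
    | some v =>
      by_cases hv : v = ty
      · subst hv
        have := h2 e he hd
        have : (pvGetD e "normal" == "") = true := by
          rw [pvGetD_eq_dLookup, this]; simp
        simp [this]
      · have : (pvGetD e "type" != ty) = true := by
          rw [pvGetD_eq_dLookup, hd]; simpa using hv
        simp [this]

-- per-field step functions of A's loop
def fnStep (f : Option String) (e : List (String × String)) : Option String :=
  if pvGetD e "type" == "NAME" && (f.getD "" == "") then some (pvGetD e "normal") else f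
def pnStep (p : Option String) (e : List (String × String)) : Option String :=
  if pvGetD e "type" == "PHONE" && (p.getD "" == "") then some (pvGetD e "normal") else p
def dtStep (t : Option String) (e : List (String × String)) : Option String :=
  if pvGetD e "type" == "DEVICE" then some (pvGetD e "normal") else t
def dnStep (n : Option String) (e : List (String × String)) : Option String :=
  if pvGetD e "type" == "DEVICE" && (pvGetD e "text" != pvGetD e "normal") then some (pvGetD e "text") else n
-- the step on a single string (full_name / phone_num update once the entity list is projected)
def nstep (f : Option String) (n : String) : Option String :=
  if f.getD "" == "" then some n else f

lemma aStep_components (s : Option String × Option String × Option String × Option String)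
    (e : List (String × String)) :
    aStep s e = (fnStep s.1 e, pnStep s.2.1 e, dtStep s.2.2.1 e, dnStep s.2.2.2 e) := by
  obtain ⟨f, p, t, n⟩ := s
  simp only [aStep, fnStep, pnStep, dtStep, dnStep]
  by_cases h1 : (pvGetD e "type" == "NAME") = true <;>
  by_cases h2 : (pvGetD e "type" == "PHONE") = true <;>
  by_cases h3 : (pvGetD e "type" == "DEVICE") = true <;>
    simp_all <;> split_ifs <;> simp_all

lemma foldl_aStep_components (l : List (List (String × String)))
    (s : Option String × Option String × Option String × Option String) :
    l.foldl aStep s = (l.foldl fnStep s.1, l.foldl pnStep s.2.1, l.foldl dtStep s.2.2.1, l.foldl dnStep s.2.2.2) := by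
  induction l generalizing s with
  | nil => rfl
  | cons e rest ih => simp only [List.foldl_cons, aStep_components, ih]

-- fold over entities of fnStep/pnStep = fold of nstep over the projected string list
lemma foldl_fnStep_eq (ty : String) (l : List (List (String × String))) (acc : Option String) :
    l.foldl (fun f e => if pvGetD e "type" == ty && (f.getD "" == "") then some (pvGetD e "normal") else f) acc
      = ((l.filter (fun e => pvGetD e "type" == ty)).map (fun e => pvGetD e "normal")).foldl nstep acc := by
  induction l generalizing acc with
  | nil => rfl
  | cons e rest ih =>
    simp only [List.foldl_cons, List.filter_cons]
    by_cases h : (pvGetD e "type" == ty) = true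
    · rw [if_pos h]
      simp only [h, Bool.true_and, List.map_cons, List.foldl_cons, nstep]
      exact ih _
    · rw [if_neg h, if_neg (by simp [h])]
      exact ih _

lemma foldl_nstep_truthy (ns : List String) (s : String) (h : (s == "") = false) :
    ns.foldl nstep (some s) = some s := by
  induction ns with
  | nil => rfl
  | cons n rest ih => simp [nstep, h, ih]

lemma foldl_nstep_falsy (ns : List String) (acc : Option String) (h : (acc.getD "" == "") = true) :
    ns.foldl nstep acc
      = match ns.find? (fun n => n != "") with
        | some n => some n
        | none => if ns.isEmpty then acc else some "" := by
  induction ns generalizing acc with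
  | nil => simp
  | cons n rest ih =>
    simp only [List.foldl_cons, List.find?_cons]
    by_cases hn : (n != "") = true
    · have hn' : (n == "") = false := by simpa using hn
      simp [nstep, h, hn, foldl_nstep_truthy rest n hn']
    · have hn' : n = "" := by simpa using hn
      subst hn'
      rw [nstep, if_pos h, ih (some "") (by simp)]
      simp only [hn, Bool.false_eq_true, if_false]
      cases hfind : rest.find? (fun n => n != "") <;> simp [hfind]

-- B's combined find? over entities equals find? of the truthiness test over the projected strings
lemma find_proj_eq (ty : String) (l : List (List (String × String))) :
    (l.find? (fun e => pvGetD e "type" == ty && pvGetD e "normal" != "")).map (fun e => pvGetD e "normal")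
      = ((l.filter (fun e => pvGetD e "type" == ty)).map (fun e => pvGetD e "normal")).find? (fun n => n != "") := by
  induction l with
  | nil => rfl
  | cons e rest ih =>
    simp only [List.find?_cons, List.filter_cons]
    by_cases h : (pvGetD e "type" == ty) = true
    · by_cases hn : (pvGetD e "normal" != "") = true <;>
        simp [h, hn, List.find?_cons, ih]
    · simp [h, List.find?_cons, ih]

lemma foldl_dtStep_eq (l : List (List (String × String))) (acc : Option String) :
    l.foldl dtStep acc
      = match (l.filter (fun e => pvGetD e "type" == "DEVICE")).getLast? with
        | none => acc
        | some d => some (pvGetD d "normal") := by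
  induction l generalizing acc with
  | nil => rfl
  | cons e rest ih =>
    by_cases h : (pvGetD e "type" == "DEVICE") = true
    · simp only [List.foldl_cons, dtStep, h, if_true, List.filter_cons, ih]
      cases hl : rest.filter (fun e => pvGetD e "type" == "DEVICE") <;>
        simp [hl, List.getLast?_cons]
    · simp [dtStep, h, List.filter_cons, ih]

lemma foldl_dnStep_eq (l : List (List (String × String))) (acc : Option String) :
    l.foldl dnStep acc
      = match ((l.filter (fun e => pvGetD e "type" == "DEVICE")).reverse.find?
                (fun d => pvGetD d "text" != pvGetD d "normal")) with
        | some d => some (pvGetD d "text")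
        | none => acc := by
  induction l generalizing acc with
  | nil => rfl
  | cons e rest ih =>
    by_cases h : (pvGetD e "type" == "DEVICE") = true
    · simp only [List.foldl_cons, dnStep, h, Bool.true_and, List.filter_cons, if_pos h,
        List.reverse_cons, List.find?_append, ih]
      by_cases hp : (pvGetD e "text" != pvGetD e "normal") = true <;>
        cases hfind : (rest.filter (fun e => pvGetD e "type" == "DEVICE")).reverse.find?
            (fun d => pvGetD d "text" != pvGetD d "normal") <;>
          simp [hp, hfind, Option.orElse]
    · simp [dnStep, h, List.filter_cons, ih]

-- A's full_name/phone_num field characterised against B's, given ¬(that disjunct of D_)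
lemma name_field_eq (ty : String) (l : List (List (String × String)))
    (hD : ¬ ((l.any (fun e => pvGetD e "type" == ty)) = true ∧
             (l.all (fun e => pvGetD e "type" != ty || pvGetD e "normal" == "")) = true)) :
    l.foldl (fun f e => if pvGetD e "type" == ty && (f.getD "" == "") then some (pvGetD e "normal") else f) none
      = (l.find? (fun e => pvGetD e "type" == ty && pvGetD e "normal" != "")).map (fun e => pvGetD e "normal") := by
  rw [foldl_fnStep_eq, foldl_nstep_falsy _ none (by simp), find_proj_eq]
  cases hfind : ((l.filter (fun e => pvGetD e "type" == ty)).map (fun e => pvGetD e "normal")).find? (fun n => n != "") with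
  | some n => simp
  | none =>
    simp only
    rw [if_pos]
    by_contra hne
    apply hD
    have hall := List.find?_eq_none.mp hfind
    constructor
    · -- the filtered list is nonempty, so some entity has type ty
      rw [List.isEmpty_iff, List.map_eq_nil_iff] at hne
      rw [List.any_eq_true]
      obtain ⟨e, he⟩ := List.exists_mem_of_ne_nil _ hne
      exact ⟨e, List.mem_of_mem_filter he, (List.mem_filter.mp he).2⟩
    · rw [List.all_eq_true]
      intro e hmem
      by_cases hty : (pvGetD e "type" == ty) = true
      · have hin : pvGetD e "normal" ∈ (l.filter (fun e => pvGetD e "type" == ty)).map (fun e => pvGetD e "normal") :=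
          List.mem_map_of_mem (List.mem_filter.mpr ⟨hmem, hty⟩)
        have hne2 := hall _ hin
        have hnorm : pvGetD e "normal" = "" := by simpa using hne2
        simp [hnorm]
      · have hb : (pvGetD e "type" != ty) = true := by simpa using hty
        simp [hb]

-- inside a D_ disjunct, A's field is some "" and B's is none
lemma name_field_D (ty : String) (l : List (List (String × String)))
    (h1 : (l.any (fun e => pvGetD e "type" == ty)) = true)
    (h2 : (l.all (fun e => pvGetD e "type" != ty || pvGetD e "normal" == "")) = true) :
    l.foldl (fun f e => if pvGetD e "type" == ty && (f.getD "" == "") then some (pvGetD e "normal") else f) none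
        = some "" ∧
    (l.find? (fun e => pvGetD e "type" == ty && pvGetD e "normal" != "")).map (fun e => pvGetD e "normal") = none := by
  rw [List.all_eq_true] at h2
  have hfind : (((l.filter (fun e => pvGetD e "type" == ty)).map (fun e => pvGetD e "normal")).find? (fun n => n != "")) = none := by
    rw [List.find?_eq_none]
    intro n hn
    obtain ⟨e, he, rfl⟩ := List.mem_map.mp hn
    have hty : (pvGetD e "type" == ty) = true := (List.mem_filter.mp he).2
    have h := h2 e (List.mem_of_mem_filter he)
    simp only [Bool.or_eq_true, bne_iff_ne, beq_iff_eq] at h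
    rcases h with h | h
    · exact absurd (beq_iff_eq.mp hty) h
    · simp [h]
  constructor
  · rw [foldl_fnStep_eq, foldl_nstep_falsy _ none (by simp), hfind]
    simp only
    rw [if_neg]
    rw [List.any_eq_true] at h1
    obtain ⟨e, hmem, hty⟩ := h1
    intro hempty
    rw [List.isEmpty_iff, List.map_eq_nil_iff] at hempty
    have hin : e ∈ l.filter (fun e => pvGetD e "type" == ty) := List.mem_filter.mpr ⟨hmem, hty⟩
    rw [hempty] at hin
    simp at hin
  · rw [find_proj_eq, hfind]

-- ===== VERDICT (by name: the statement is the Claim_ definition above) =====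
theorem map_entities_to_schema_py_spec : Claim_unchanged_map_entities_to_schema_py := by
  intro entities sender_email _hdom hpre hD
  unfold map_entities_to_schema_py map_entities_to_schema_py_alt
  unfold D_map_entities_to_schema_py at hD
  push Not at hD
  rw [foldl_aStep_components]
  have hfn := name_field_eq "NAME" entities (by
    rintro ⟨hany, hall⟩
    obtain ⟨hex, hallD⟩ := new_of_old "NAME" (by decide) entities
      (pre_normal entities sender_email hpre "NAME" (Or.inl rfl)) hany hall
    obtain ⟨e, he, ht, hn⟩ := hD.1 hex
    exact hn (hallD e he ht))
  have hpn := name_field_eq "PHONE" entities (by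
    rintro ⟨hany, hall⟩
    obtain ⟨hex, hallD⟩ := new_of_old "PHONE" (by decide) entities
      (pre_normal entities sender_email hpre "PHONE" (Or.inr rfl)) hany hall
    obtain ⟨e, he, ht, hn⟩ := hD.2 hex
    exact hn (hallD e he ht))
  simp only [show fnStep = (fun f e => if pvGetD e "type" == "NAME" && (f.getD "" == "") then some (pvGetD e "normal") else f) from rfl,
    show pnStep = (fun p e => if pvGetD e "type" == "PHONE" && (p.getD "" == "") then some (pvGetD e "normal") else p) from rfl]
  rw [hfn, hpn, foldl_dtStep_eq, foldl_dnStep_eq]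
  cases hd : (entities.filter (fun e => pvGetD e "type" == "DEVICE")).getLast? <;>
    cases hn : (entities.filter (fun e => pvGetD e "type" == "DEVICE")).reverse.find?
        (fun d => pvGetD d "text" != pvGetD d "normal") <;>
      simp [hd, hn]

theorem map_entities_to_schema_py_changed : Claim_changed_map_entities_to_schema_py := by
  unfold Claim_changed_map_entities_to_schema_py; decide

theorem map_entities_to_schema_py_tight : Claim_exact_map_entities_to_schema_py := by
  intro entities sender_email _hdom _hpre hD heq
  unfold map_entities_to_schema_py map_entities_to_schema_py_alt at heq
  rw [foldl_aStep_components] at heq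
  simp only [List.cons.injEq, Prod.mk.injEq, and_true] at heq
  unfold D_map_entities_to_schema_py at hD
  rcases hD with ⟨h1, h2⟩ | ⟨h1, h2⟩
  · obtain ⟨h1', h2'⟩ := old_of_new "NAME" (by decide) entities h1 h2
    have := (name_field_D "NAME" entities h1' h2')
    have hA := this.1; have hB := this.2
    simp only [show fnStep = (fun f e => if pvGetD e "type" == "NAME" && (f.getD "" == "") then some (pvGetD e "normal") else f) from rfl] at heq
    rw [hA, hB] at heq
    simp at heq
  · obtain ⟨h1', h2'⟩ := old_of_new "PHONE" (by decide) entities h1 h2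
    have := (name_field_D "PHONE" entities h1' h2')
    have hA := this.1; have hB := this.2
    simp only [show pnStep = (fun p e => if pvGetD e "type" == "PHONE" && (p.getD "" == "") then some (pvGetD e "normal") else p) from rfl] at heq
    rw [hA, hB] at heq
    simp at heq
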